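-- pv_equiv track=rewrite | github.com/telethar/ALttPDoorRandomizer | source/tools/BPS.py | bps_get_vlv_len
-- ===== SOURCE A (Python) =====
-- def bps_get_vlv_len(data):
--     length = 0
--     while True:
--         x = data & 0x7f
--         data >>= 7
--         if data == 0:
--             length += 1
--             break
--         length += 1
--         data -= 1
--     return length
-- ===== SOURCE B (Python) =====
-- def bps_get_vlv_len(data):
--     length = 1
--     cap = 128
--     total = 128
--     while data >= total:
--         length += 1
--         cap *= 128
--         total += cap
--     return length
-- ===== Notes on version B (the rewrite author's own statement) =====
-- stated objective: alternative
-- what changed: B replaces A's destructive 7-bit shift-and-decrement loop on data with a cumulative-capacity scan: it keeps a running bound total = 128 + 128^2 + ... + 128^length and returns the smallest length with data < total, reading data only through comparisons.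
import Mathlib
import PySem

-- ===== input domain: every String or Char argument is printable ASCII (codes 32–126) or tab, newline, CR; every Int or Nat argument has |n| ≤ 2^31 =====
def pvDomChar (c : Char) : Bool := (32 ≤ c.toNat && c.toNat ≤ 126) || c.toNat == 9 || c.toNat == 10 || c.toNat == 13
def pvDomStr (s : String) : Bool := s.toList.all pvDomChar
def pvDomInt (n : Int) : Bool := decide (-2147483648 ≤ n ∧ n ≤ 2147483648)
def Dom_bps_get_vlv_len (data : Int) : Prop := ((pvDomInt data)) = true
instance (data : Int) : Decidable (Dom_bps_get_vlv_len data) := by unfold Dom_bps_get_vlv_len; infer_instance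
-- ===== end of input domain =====

-- B keeps a running cumulative capacity bound instead of shifting data; return value only, no mutation.
-- ===== PORT A =====
-- A's 'while True' loop, fuel-guarded (fuel = data.toNat + 1 suffices for every data ≥ 0;
-- on data < 0 the Python loop never terminates, which Pre_ excludes).
def bps_get_vlv_len_go : Nat → Int → Int → Int
  | 0, _, length => length
  | fuel + 1, data, length =>
    let _x := PySem.Int.band data 0x7f     -- x = data & 0x7f (unused, as in A)
    let data' := data >>> (7 : Nat)        -- data >>= 7
    if data' = 0 then length + 1
    else bps_get_vlv_len_go fuel (data' - 1) (length + 1)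

def bps_get_vlv_len (data : Int) : Int :=
  bps_get_vlv_len_go (data.toNat + 1) data 0

-- ===== PORT B =====
-- B's 'while data >= total' loop, fuel-guarded (same sufficient fuel).
def bps_get_vlv_len_alt_go : Nat → Int → Int → Int → Int → Int
  | 0, _, length, _, _ => length
  | fuel + 1, data, length, cap, total =>
    if total ≤ data then
      bps_get_vlv_len_alt_go fuel data (length + 1) (cap * 128) (total + cap * 128)
    else length

def bps_get_vlv_len_alt (data : Int) : Int :=
  bps_get_vlv_len_alt_go (data.toNat + 1) data 1 128 128

-- ===== PRECONDITION & SPEC =====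
-- Pre_ excludes data < 0, on which Python A never terminates (the arithmetic right shift
-- never reaches 0), so A returns no value there; B returns 1.
def Pre_bps_get_vlv_len (data : Int) : Prop := 0 ≤ data
instance (data : Int) : Decidable (Pre_bps_get_vlv_len data) := by unfold Pre_bps_get_vlv_len; infer_instance
def pvWitness_bps_get_vlv_len : Int := 1000

def Spec_bps_get_vlv_len (data : Int) (out : Int) : Prop := out = bps_get_vlv_len_alt data
instance (data : Int) (out : Int) : Decidable (Spec_bps_get_vlv_len data out) := by unfold Spec_bps_get_vlv_len; infer_instance

-- ===== CLAIM (what is proved, stated in full; the proofs are below) =====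
def Claim_equal_bps_get_vlv_len : Prop := ∀ (data : Int), Dom_bps_get_vlv_len data → Pre_bps_get_vlv_len data → Spec_bps_get_vlv_len data (bps_get_vlv_len data)

-- ===== LEMMAS AND PROOFS =====

-- One unfolding of A's loop, with the shift rewritten as floor division by 128.
theorem goA_step (fuel : Nat) (data length : Int) :
    bps_get_vlv_len_go (fuel + 1) data length =
      if data / 128 = 0 then length + 1
      else bps_get_vlv_len_go fuel (data / 128 - 1) (length + 1) := by
  show (let _x := PySem.Int.band data 0x7f;
        let data' := data >>> (7 : Nat);
        if data' = 0 then length + 1 else bps_get_vlv_len_go fuel (data' - 1) (length + 1)) = _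
  simp only [Int.shiftRight_eq_div_pow]
  norm_num

theorem goB_step (fuel : Nat) (data length cap total : Int) :
    bps_get_vlv_len_alt_go (fuel + 1) data length cap total =
      if total ≤ data then
        bps_get_vlv_len_alt_go fuel data (length + 1) (cap * 128) (total + cap * 128)
      else length := rfl

-- ===== VERDICT (by name: the statement is the Claim_ definition above) =====
theorem bps_get_vlv_len_spec : Claim_equal_bps_get_vlv_len := by
  intro data hdom hpre
  unfold Spec_bps_get_vlv_len bps_get_vlv_len bps_get_vlv_len_alt
  have hd : 0 ≤ data := hpre
  have hub : data ≤ 2147483648 := by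
    unfold Dom_bps_get_vlv_len pvDomInt at hdom
    simpa using (of_decide_eq_true hdom).2
  -- the answer is between 1 and 5 on this domain; split into the five capacity intervals
  rcases lt_or_ge data 128 with h1 | h1
  · -- length 1
    obtain ⟨m, hm⟩ : ∃ m, data.toNat + 1 = m + 1 := ⟨data.toNat, rfl⟩
    have hA : bps_get_vlv_len_go (m + 1) data 0 = 1 := by
      rw [goA_step, if_pos (by omega)]; norm_num
    have hB : bps_get_vlv_len_alt_go (m + 1) data 1 128 128 = 1 := by
      rw [goB_step, if_neg (by omega)]
    rw [hm, hA, hB]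
  · rcases lt_or_ge data 16512 with h2 | h2
    · -- length 2
      obtain ⟨m, hm⟩ : ∃ m, data.toNat + 1 = m + 2 := ⟨data.toNat - 1, by omega⟩
      have hA : bps_get_vlv_len_go (m + 1 + 1) data 0 = 2 := by
        rw [goA_step, if_neg (by omega), goA_step, if_pos (by omega)]; norm_num
      have hB : bps_get_vlv_len_alt_go (m + 1 + 1) data 1 128 128 = 2 := by
        rw [goB_step, if_pos (by omega)]
        norm_num
        rw [goB_step, if_neg (by omega)]
      rw [hm] ; rw [show m + 2 = m + 1 + 1 from rfl, hA, hB]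
    · rcases lt_or_ge data 2113664 with h3 | h3
      · -- length 3
        obtain ⟨m, hm⟩ : ∃ m, data.toNat + 1 = m + 3 := ⟨data.toNat - 2, by omega⟩
        have hA : bps_get_vlv_len_go (m + 1 + 1 + 1) data 0 = 3 := by
          rw [goA_step, if_neg (by omega), goA_step, if_neg (by omega),
              goA_step, if_pos (by omega)]; norm_num
        have hB : bps_get_vlv_len_alt_go (m + 1 + 1 + 1) data 1 128 128 = 3 := by
          rw [goB_step, if_pos (by omega)]
          norm_num
          rw [goB_step, if_pos (by omega)]
          norm_num
          rw [goB_step, if_neg (by omega)]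
        rw [hm] ; rw [show m + 3 = m + 1 + 1 + 1 from rfl, hA, hB]
      · rcases lt_or_ge data 270549120 with h4 | h4
        · -- length 4
          obtain ⟨m, hm⟩ : ∃ m, data.toNat + 1 = m + 4 := ⟨data.toNat - 3, by omega⟩
          have hA : bps_get_vlv_len_go (m + 1 + 1 + 1 + 1) data 0 = 4 := by
            rw [goA_step, if_neg (by omega), goA_step, if_neg (by omega),
                goA_step, if_neg (by omega), goA_step, if_pos (by omega)]; norm_num
          have hB : bps_get_vlv_len_alt_go (m + 1 + 1 + 1 + 1) data 1 128 128 = 4 := by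
            rw [goB_step, if_pos (by omega)]
            norm_num
            rw [goB_step, if_pos (by omega)]
            norm_num
            rw [goB_step, if_pos (by omega)]
            norm_num
            rw [goB_step, if_neg (by omega)]
          rw [hm] ; rw [show m + 4 = m + 1 + 1 + 1 + 1 from rfl, hA, hB]
        · -- length 5 (the next capacity bound 34630287488 exceeds 2^31)
          obtain ⟨m, hm⟩ : ∃ m, data.toNat + 1 = m + 5 := ⟨data.toNat - 4, by omega⟩
          have hA : bps_get_vlv_len_go (m + 1 + 1 + 1 + 1 + 1) data 0 = 5 := by
            rw [goA_step, if_neg (by omega), goA_step, if_neg (by omega),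
                goA_step, if_neg (by omega), goA_step, if_neg (by omega),
                goA_step, if_pos (by omega)]; norm_num
          have hB : bps_get_vlv_len_alt_go (m + 1 + 1 + 1 + 1 + 1) data 1 128 128 = 5 := by
            rw [goB_step, if_pos (by omega)]
            norm_num
            rw [goB_step, if_pos (by omega)]
            norm_num
            rw [goB_step, if_pos (by omega)]
            norm_num
            rw [goB_step, if_pos (by omega)]
            norm_num
            rw [goB_step, if_neg (by omega)]
          rw [hm] ; rw [show m + 5 = m + 1 + 1 + 1 + 1 + 1 from rfl, hA, hB]
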